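-- pv_equiv track=rewrite | github.com/Hunterbacon111/pondmoon-PPP | Greenwood_At_Katy/src/extractors/budget.py | _find_label_column
-- ===== SOURCE A (Python) =====
-- def _find_label_column(rows_data):
--     """Determine which column contains the row labels.
--
--     The Budget Summary sheet uses column 9 or 10 for labels.
--     We detect it by looking for known label strings.
--     """
--     known_labels = {"TOTAL INCOME", "NET OPERATING INCOME", "Potential Rent",
--                     "Payroll & Benefits", "TOTAL OPERATING EXPENSES"}
--     for col_idx in [9, 10, 8, 7]:
--         matches = 0
--         for row in rows_data:
--             if col_idx < len(row):
--                 val = row[col_idx]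
--                 if val and str(val).strip() in known_labels:
--                     matches += 1
--         if matches >= 3:
--             return col_idx
--     return 10  # default
-- ===== SOURCE B (Python) =====
-- def _find_label_column(rows_data):
--     """Determine which column contains the row labels.
--
--     Single pass over every cell: build an index mapping each column position
--     to the number of known label strings seen there, then decide from it.
--     """
--     known_labels = {"TOTAL INCOME", "NET OPERATING INCOME", "Potential Rent",
--                     "Payroll & Benefits", "TOTAL OPERATING EXPENSES"}
--     hits = {}
--     for row in rows_data:
--         for idx, val in enumerate(row):
--             if val and str(val).strip() in known_labels:
--                 hits[idx] = hits.get(idx, 0) + 1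
--     for col_idx in (9, 10, 8, 7):
--         if hits.get(col_idx, 0) >= 3:
--             return col_idx
--     return 10
-- ===== Notes on version B (the rewrite author's own statement) =====
-- stated objective: alternative
-- what changed: B makes one pass over every cell of every row, building a position index (dict: column index -> count of known labels seen at that position) with no candidate-column loop in the scan, then reads the four candidates off the index in priority order; A re-scans all rows once per candidate column with early return.
import Mathlib
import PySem

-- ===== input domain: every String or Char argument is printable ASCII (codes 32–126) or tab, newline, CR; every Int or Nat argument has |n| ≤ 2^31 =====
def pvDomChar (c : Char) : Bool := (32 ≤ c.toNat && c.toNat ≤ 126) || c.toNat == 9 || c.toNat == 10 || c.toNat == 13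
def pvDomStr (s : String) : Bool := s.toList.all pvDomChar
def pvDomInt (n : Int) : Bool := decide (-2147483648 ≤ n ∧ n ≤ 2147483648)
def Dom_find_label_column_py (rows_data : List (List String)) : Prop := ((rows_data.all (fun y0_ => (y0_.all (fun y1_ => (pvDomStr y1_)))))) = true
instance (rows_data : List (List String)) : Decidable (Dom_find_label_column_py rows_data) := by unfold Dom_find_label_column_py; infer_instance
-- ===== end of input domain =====

-- B builds a position index of label hits in one pass over every cell (no candidate loop in the scan), then decides; A re-scans all rows per candidate column.

-- ===== PORT A =====
def pvKnown : List String :=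
  ["TOTAL INCOME", "NET OPERATING INCOME", "Potential Rent",
   "Payroll & Benefits", "TOTAL OPERATING EXPENSES"]

-- 'val and str(val).strip() in known_labels'
def pvIsLabel (val : String) : Bool :=
  (val != "") && pvKnown.contains (PySem.Str.strip val)

-- A's inner row test: 'if col_idx < len(row): val = row[col_idx]; if val and …'
def pvHit (c : Nat) (row : List String) : Bool :=
  if c < row.length then pvIsLabel (row.getD c "") else false

def pvALoop (rows_data : List (List String)) : List Nat → Int
  | [] => 10
  | c :: rest =>
    let nmatches := rows_data.foldl (fun m row => if pvHit c row then m + 1 else m) (0 : Int)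
    if nmatches ≥ 3 then (c : Int) else pvALoop rows_data rest

def find_label_column_py (rows_data : List (List String)) : Int :=
  pvALoop rows_data [9, 10, 8, 7]

-- ===== PORT B =====
-- hits[idx] = hits.get(idx, 0) + 1 inside 'for idx, val in enumerate(row)'
def pvRowScan (d : PySem.Dict Int Int) (row : List String) : PySem.Dict Int Int :=
  (PySem.List.enumerate row 0).foldl
    (fun d p => if pvIsLabel p.2 then d.insert p.1 (d.getD p.1 0 + 1) else d) d

def pvHits (rows_data : List (List String)) : PySem.Dict Int Int :=
  rows_data.foldl pvRowScan PySem.Dict.empty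

def pvBDecide (hits : PySem.Dict Int Int) : List Int → Int
  | [] => 10
  | c :: rest => if hits.getD c 0 ≥ 3 then c else pvBDecide hits rest

def find_label_column_py_alt (rows_data : List (List String)) : Int :=
  pvBDecide (pvHits rows_data) [9, 10, 8, 7]

-- ===== PRECONDITION & SPEC =====
def Spec_find_label_column_py (rows_data : List (List String)) (out : Int) : Prop := out = find_label_column_py_alt rows_data
instance (rows_data : List (List String)) (out : Int) : Decidable (Spec_find_label_column_py rows_data out) := by unfold Spec_find_label_column_py; infer_instance

-- ===== CLAIM (what is proved, stated in full; the proofs are below) =====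
def Claim_equal_find_label_column_py : Prop := ∀ (rows_data : List (List String)), Dom_find_label_column_py rows_data → Spec_find_label_column_py rows_data (find_label_column_py rows_data)

-- ===== LEMMAS AND PROOFS =====

-- A's per-column tally is a countP
theorem pvA_nmatches (rows : List (List String)) (c : Nat) (m : Int) :
    rows.foldl (fun m row => if pvHit c row then m + 1 else m) m
      = m + (rows.countP (pvHit c) : Int) := by
  induction rows generalizing m with
  | nil => simp
  | cons r rs ih =>
    simp only [List.foldl, List.countP_cons]
    by_cases h : pvHit c r = true <;> simp [h, ih] <;> push_cast <;> ring

-- incrementing fold over any pair list: entry c grows by the count of matching pairs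
theorem pvFold_pairs (l : List (Int × String)) (d : PySem.Dict Int Int) (c : Int) :
    (l.foldl (fun d p => if pvIsLabel p.2 then d.insert p.1 (d.getD p.1 0 + 1) else d) d).getD c 0
      = d.getD c 0 + (l.countP (fun p => p.1 == c && pvIsLabel p.2) : Int) := by
  induction l generalizing d with
  | nil => simp
  | cons p rest ih =>
    simp only [List.foldl, List.countP_cons]
    by_cases hl : pvIsLabel p.2 = true
    · by_cases hc : p.1 = c
      · subst hc
        simp [hl, ih, PySem.Dict.getD_insert_self]
        push_cast; ring
      · have hc' : ¬ c = p.1 := fun h => hc h.symm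
        simp [hl, ih, PySem.Dict.getD_insert, hc', hc]
    · simp [hl, ih]

-- counting matching pairs along enumerate picks out at most the one cell at column c
theorem pvCount_enum' (row : List String) (s c : Int) :
    (PySem.List.enumerate row s).countP (fun p => p.1 == c && pvIsLabel p.2)
      = if s ≤ c ∧ c - s < row.length ∧ pvIsLabel (row.getD (c - s).toNat "") then 1 else 0 := by
  induction row generalizing s with
  | nil =>
    have hno : ¬ (s ≤ c ∧ c - s < ((List.length ([] : List String) : Int)) ∧
        pvIsLabel (([] : List String).getD (c - s).toNat "") = true) := by
      rintro ⟨a, b, -⟩; simp only [List.length_nil, Int.natCast_zero] at b; omega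
    simp only [PySem.List.enumerate_nil, List.countP_nil, if_neg hno]
  | cons x xs ih =>
    rw [PySem.List.enumerate_cons, List.countP_cons, ih (s + 1)]
    by_cases hc : s = c
    · subst hc
      have ht : ¬ ((s : Int) + 1 ≤ s) := by omega
      have h0 : (s - s).toNat = 0 := by omega
      by_cases hx : pvIsLabel x = true <;> simp [ht, hx, h0]
    · have hne : ((s, x).1 == c) = false := by simp [hc]
      simp only [hne, Bool.false_and, if_neg Bool.false_ne_true, add_zero, List.length_cons]
      by_cases hlt : s < c
      · have hg : (c - s).toNat = (c - (s + 1)).toNat + 1 := by omega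
        rw [hg, List.getD_cons_succ]
        have hcond : (s + 1 ≤ c ∧ c - (s + 1) < ((xs.length : Int)) ∧
              pvIsLabel (xs.getD (c - (s + 1)).toNat "") = true) ↔
            (s ≤ c ∧ c - s < (((xs.length + 1 : Nat) : Int)) ∧
              pvIsLabel (xs.getD (c - (s + 1)).toNat "") = true) := by
          constructor <;> rintro ⟨a, b, p⟩ <;> exact ⟨by omega, by push_cast at b ⊢; omega, p⟩
        exact if_congr hcond rfl rfl
      · have h1 : ¬ (s ≤ c) := by omega
        have h2 : ¬ (s + 1 ≤ c) := by omega
        simp [h1, h2]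

-- one row's scan bumps entry c exactly when A's pvHit fires (c a Nat cast)
theorem pvRowScan_getD (d : PySem.Dict Int Int) (row : List String) (c : Nat) :
    (pvRowScan d row).getD (c : Int) 0
      = d.getD (c : Int) 0 + (if pvHit c row then 1 else 0) := by
  rw [pvRowScan, pvFold_pairs, pvCount_enum']
  have h1 : ((c : Int) - 0).toNat = c := by omega
  by_cases h : c < row.length
  · simp [pvHit, h, h1]
  · have : ¬ ((c : Int) - 0 < (row.length : Int)) := by omega
    simp [pvHit, h, this]

theorem pvHits_getD (rows : List (List String)) (d : PySem.Dict Int Int) (c : Nat) :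
    (rows.foldl pvRowScan d).getD (c : Int) 0
      = d.getD (c : Int) 0 + (rows.countP (pvHit c) : Int) := by
  induction rows generalizing d with
  | nil => simp
  | cons r rs ih =>
    simp only [List.foldl, List.countP_cons, ih, pvRowScan_getD d r c]
    by_cases h : pvHit c r = true <;> simp [h] <;> push_cast <;> ring

theorem pvHits_eq (rows : List (List String)) (c : Nat) :
    (pvHits rows).getD (c : Int) 0 = (rows.countP (pvHit c) : Int) := by
  rw [pvHits, pvHits_getD]
  simp [PySem.Dict.getD, PySem.Dict.get?, PySem.Dict.empty]

-- ===== VERDICT (by name: the statement is the Claim_ definition above) =====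
theorem find_label_column_py_spec : Claim_equal_find_label_column_py := by
  intro rows _
  unfold Spec_find_label_column_py find_label_column_py find_label_column_py_alt
  have h9 := pvHits_eq rows 9
  have h10 := pvHits_eq rows 10
  have h8 := pvHits_eq rows 8
  have h7 := pvHits_eq rows 7
  push_cast at h9 h10 h8 h7
  simp only [pvALoop, pvBDecide, pvA_nmatches, zero_add]
  norm_num [h9, h10, h8, h7]
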